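-- pv_equiv track=rewrite | github.com/ShodmonovZafar/mini_dasturlar | kitobni_nusxalash.py | f
-- ===== SOURCE A (Python) =====
-- def f(toq_son, juft_son):
--     n = (juft_son - (toq_son - 1)) // 4
--     l = []
--     for i in range(n):
--         l.append(toq_son)
--         l.append(juft_son)
--         toq_son += 2
--         juft_son -= 2
--     return l
-- ===== SOURCE B (Python) =====
-- def f(toq_son, juft_son):
--     n = (juft_son - (toq_son - 1)) // 4
--     odds = [toq_son + 2 * i for i in range(n)]
--     evens = [juft_son - 2 * i for i in range(n)]
--     return [x for pair in zip(odds, evens) for x in pair]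
-- ===== Notes on version B (the rewrite author's own statement) =====
-- stated objective: alternative
-- what changed: Replaces the single fused loop that mutates both counters while appending pairs with two closed-form index comprehensions (odds and evens) that are zipped and flattened into the result; no running state is mutated.
import Mathlib
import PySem

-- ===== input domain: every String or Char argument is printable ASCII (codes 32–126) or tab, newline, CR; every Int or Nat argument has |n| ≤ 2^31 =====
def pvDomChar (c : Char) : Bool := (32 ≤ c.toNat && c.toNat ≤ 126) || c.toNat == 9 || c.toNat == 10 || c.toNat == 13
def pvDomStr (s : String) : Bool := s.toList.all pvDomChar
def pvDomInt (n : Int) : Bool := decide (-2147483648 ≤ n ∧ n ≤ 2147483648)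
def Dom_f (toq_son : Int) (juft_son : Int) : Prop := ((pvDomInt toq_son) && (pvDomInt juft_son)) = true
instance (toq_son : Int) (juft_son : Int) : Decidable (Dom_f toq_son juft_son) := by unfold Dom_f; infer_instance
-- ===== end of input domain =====

-- B builds the odd and even sequences by closed-form indices and interleaves them,
-- instead of A's fused loop mutating both counters (alternative decomposition, same cost).
-- ===== PORT A =====
def f (toq_son : Int) (juft_son : Int) : List Int :=
  ((PySem.List.pyRange 0 (PySem.Int.floordiv (juft_son - (toq_son - 1)) 4) 1).foldl
    (fun (s : List Int × Int × Int) _ =>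
      (s.1 ++ [s.2.1] ++ [s.2.2], s.2.1 + 2, s.2.2 - 2))
    (([] : List Int), toq_son, juft_son)).1

-- ===== PORT B =====
def f_alt (toq_son : Int) (juft_son : Int) : List Int :=
  (((PySem.List.pyRange 0 (PySem.Int.floordiv (juft_son - (toq_son - 1)) 4) 1).map
      (fun i => toq_son + 2 * i)).zip
    ((PySem.List.pyRange 0 (PySem.Int.floordiv (juft_son - (toq_son - 1)) 4) 1).map
      (fun i => juft_son - 2 * i))).flatMap (fun p => [p.1, p.2])

-- ===== PRECONDITION & SPEC =====
def Spec_f (toq_son : Int) (juft_son : Int) (out : List Int) : Prop := out = f_alt toq_son juft_son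
instance (toq_son : Int) (juft_son : Int) (out : List Int) : Decidable (Spec_f toq_son juft_son out) := by unfold Spec_f; infer_instance

-- ===== CLAIM (what is proved, stated in full; the proofs are below) =====
def Claim_equal_f : Prop := ∀ (toq_son : Int) (juft_son : Int), Dom_f toq_son juft_son → Spec_f toq_son juft_son (f toq_son juft_son)

-- ===== LEMMAS AND PROOFS =====

lemma loop_eq (m : Nat) (t j : Int) (acc : List Int) :
    (PySem.List.pyRange 0 (m : Int) 1).foldl
      (fun (s : List Int × Int × Int) _ =>
        (s.1 ++ [s.2.1] ++ [s.2.2], s.2.1 + 2, s.2.2 - 2))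
      (acc, t, j)
    = (acc ++ (PySem.List.pyRange 0 (m : Int) 1).flatMap (fun i => [t + 2 * i, j - 2 * i]),
       t + 2 * m, j - 2 * m) := by
  induction m with
  | zero => simp
  | succ k ih =>
    have h : (0 : Int) ≤ (k : Int) := by omega
    have hr : PySem.List.pyRange 0 ((k + 1 : Nat) : Int) 1
        = PySem.List.pyRange 0 (k : Int) 1 ++ [(k : Int)] := by
      push_cast
      exact PySem.List.pyRange_one_succ_right h
    rw [hr, List.foldl_append, ih]
    simp only [List.flatMap_append, List.flatMap_cons, List.flatMap_nil, List.append_nil,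
      List.foldl_cons, List.foldl_nil, Prod.mk.injEq, List.append_assoc]
    refine ⟨rfl, by push_cast; ring, by push_cast; ring⟩

-- ===== VERDICT (by name: the statement is the Claim_ definition above) =====
theorem f_spec : Claim_equal_f := by
  intro t j _
  unfold Spec_f f f_alt
  set n : Int := PySem.Int.floordiv (j - (t - 1)) 4 with hn
  by_cases hpos : 0 < n
  · have hc : n = ((n.toNat : Nat) : Int) := by omega
    rw [hc, loop_eq]
    simp [List.zip_map', List.flatMap_map]
  · have hle : n ≤ 0 := by omega
    rw [PySem.List.pyRange_one_eq_nil hle]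
    simp
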